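-- pv_equiv track=rewrite | github.com/katari15045/ai | course/ass_1/main.py | get_tar_conf
-- ===== SOURCE A (Python) =====
-- def get_conf(grid):
--     s = ""
--     cur_row = 0
--     while(cur_row < len(grid)):
--         cur_col = 0
--         while(cur_col < len(grid[cur_row])):
--             cur_num = grid[cur_row][cur_col]
--             s = s + str(cur_num) + ", "
--             cur_col = cur_col+1
--         cur_row = cur_row+1
--     return s
--
-- def get_tar_conf(rows):
--     num = 1
--     row = 0
--     grid = []
--     while(row < rows):
--         col = 0
--         new_row = []
--         while(col < rows):
--             new_row.append(num)
--             num = num+1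
--             col = col+1
--         grid.append(new_row)
--         row = row+1
--     grid[rows-1][rows-1] = 0
--     return get_conf(grid)
-- ===== SOURCE B (Python) =====
-- def get_tar_conf(rows):
--     flat = [i for r in range(rows) for i in range(r * rows + 1, r * rows + rows + 1)]
--     flat[-1] = 0
--     return ''.join(str(x) + ', ' for x in flat)
-- ===== Notes on version B (the rewrite author's own statement) =====
-- stated objective: simpler
-- what changed: Replaces A's two nested-while passes (build an n x n list-of-lists with a running counter, then a separate helper that walks the grid again to serialize) with a single flat list comprehension whose entries are computed arithmetically from the row index, an in-place last-element overwrite, and one join.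
import Mathlib
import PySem

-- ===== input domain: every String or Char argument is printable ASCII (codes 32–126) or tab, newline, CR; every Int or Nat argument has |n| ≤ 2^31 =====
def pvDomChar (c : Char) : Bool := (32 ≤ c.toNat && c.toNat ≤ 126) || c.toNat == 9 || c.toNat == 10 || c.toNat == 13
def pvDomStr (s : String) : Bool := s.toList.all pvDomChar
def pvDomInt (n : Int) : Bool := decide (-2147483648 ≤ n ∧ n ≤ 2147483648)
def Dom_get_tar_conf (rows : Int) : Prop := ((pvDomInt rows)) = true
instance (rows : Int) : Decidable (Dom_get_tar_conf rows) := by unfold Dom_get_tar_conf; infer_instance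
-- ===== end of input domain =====

-- B replaces A's build-a-grid-then-walk-it-again two-pass structure by one flat arithmetic
-- comprehension plus a join (objective: simpler; same asymptotic cost).

-- ===== PORT A =====
-- helper get_conf: two nested while loops accumulating a string
def pvGetConf (grid : List (List Int)) : String :=
  grid.foldl (fun s row => row.foldl (fun s num => s ++ PySem.Int.toStr num ++ ", ") s) ""

def get_tar_conf (rows : Int) : String :=
  -- outer while row < rows / inner while col < rows, state (num, grid) / (num, new_row)
  let st := (PySem.List.pyRange 0 rows 1).foldl
    (fun (st : Int × List (List Int)) _ =>
      let inner := (PySem.List.pyRange 0 rows 1).foldl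
        (fun (p : Int × List Int) _ => (p.1 + 1, p.2 ++ [p.1])) (st.1, ([] : List Int))
      (inner.1, st.2 ++ [inner.2])) (1, ([] : List (List Int)))
  -- grid[rows-1][rows-1] = 0  (pySetD/pyGetD: total forms; Python raises IndexError exactly
  -- when the index is out of range, i.e. rows ≤ 0 — those inputs are excluded by Pre_)
  let grid := PySem.List.pySetD st.2 (rows - 1)
      (PySem.List.pySetD (PySem.List.pyGetD st.2 (rows - 1) []) (rows - 1) 0)
  pvGetConf grid

-- ===== PORT B =====
def get_tar_conf_alt (rows : Int) : String :=
  -- flat = [i for r in range(rows) for i in range(r*rows+1, r*rows+rows+1)]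
  let flat := (PySem.List.pyRange 0 rows 1).flatMap
      (fun r => PySem.List.pyRange (r * rows + 1) (r * rows + rows + 1) 1)
  -- flat[-1] = 0  (pySetD total form; Python raises IndexError on empty flat, i.e. rows ≤ 0,
  -- excluded by Pre_)
  let flat2 := PySem.List.pySetD flat (-1) 0
  PySem.Str.join "" (flat2.map (fun x => PySem.Int.toStr x ++ ", "))

-- ===== PRECONDITION & SPEC =====
-- Both Pythons raise IndexError for rows ≤ 0 (the grid / flat list is empty, so the final
-- assignment grid[rows-1][rows-1] = 0 resp. flat[-1] = 0 is out of range).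
def Pre_get_tar_conf (rows : Int) : Prop := 1 ≤ rows
instance (rows : Int) : Decidable (Pre_get_tar_conf rows) := by unfold Pre_get_tar_conf; infer_instance
def pvWitness_get_tar_conf : Int := (3)

def Spec_get_tar_conf (rows : Int) (out : String) : Prop := out = get_tar_conf_alt rows
instance (rows : Int) (out : String) : Decidable (Spec_get_tar_conf rows out) := by unfold Spec_get_tar_conf; infer_instance

-- ===== CLAIM (what is proved, stated in full; the proofs are below) =====
def Claim_equal_get_tar_conf : Prop := ∀ (rows : Int), Dom_get_tar_conf rows → Pre_get_tar_conf rows → Spec_get_tar_conf rows (get_tar_conf rows)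

-- ===== LEMMAS AND PROOFS =====

-- last element of a snoc list: getD / set
theorem pvLast_getD {α : Type} (l : List α) (x d : α) : (l ++ [x]).getD l.length d = x := by
  induction l with
  | nil => rfl
  | cons a t ih => simp only [List.cons_append, List.length_cons, List.getD_cons_succ]; exact ih

theorem pvLast_set {α : Type} (l : List α) (x v : α) : (l ++ [x]).set l.length v = l ++ [v] := by
  induction l with
  | nil => rfl
  | cons a t ih => simp [ih]

theorem pvLast_getD' {α : Type} (l : List α) (x d : α) (n : Nat) (h : n = l.length) :
    (l ++ [x]).getD n d = x := by
  subst h; exact pvLast_getD l x d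

theorem pvLast_set' {α : Type} (l : List α) (x v : α) (n : Nat) (h : n = l.length) :
    (l ++ [x]).set n v = l ++ [v] := by
  subst h; exact pvLast_set l x v

-- flat[-1] = v on a nonempty list replaces the last element
theorem pvSet_neg {α : Type} (l : List α) (x v : α) :
    PySem.List.pySetD (l ++ [x]) (-1) v = l ++ [v] := by
  simp [PySem.List.pySetD, PySem.List.pySet?, PySem.List.pyIdx?]

-- serialization at the character level (both final strings are compared through toList)
def pvSerL (xs : List Int) : List Char :=
  (xs.map (fun x => (PySem.Int.toStr x ++ ", ").toList)).flatten

-- ''.join at the character level is flatten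
theorem pvJoinNil (l : List (List Char)) : PySem.Chars.join [] l = l.flatten := by
  induction l with
  | nil => simp [PySem.Chars.join, List.intercalate]
  | cons a t ih =>
      cases t with
      | nil => simp [PySem.Chars.join, List.intercalate]
      | cons b u => rw [PySem.Chars.join_cons_cons]; simp_all

theorem pvJoinStr (xs : List Int) :
    (PySem.Str.join "" (xs.map (fun x => PySem.Int.toStr x ++ ", "))).toList = pvSerL xs := by
  rw [PySem.Str.toList_join]
  simp [pvJoinNil, pvSerL, Function.comp_def]

-- the inner string loop of get_conf
theorem pvGetConf_row (row : List Int) (s : String) :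
    (row.foldl (fun s num => s ++ PySem.Int.toStr num ++ ", ") s).toList
      = s.toList ++ pvSerL row := by
  induction row generalizing s with
  | nil => simp [pvSerL]
  | cons a t ih => rw [List.foldl_cons, ih]; simp [pvSerL]

theorem pvGetConf_toList (grid : List (List Int)) :
    (pvGetConf grid).toList = pvSerL grid.flatten := by
  suffices h : ∀ (g : List (List Int)) (s : String),
      (g.foldl (fun s row => row.foldl (fun s num => s ++ PySem.Int.toStr num ++ ", ") s) s).toList
        = s.toList ++ pvSerL g.flatten by
    simpa [pvGetConf] using h grid ""
  intro g
  induction g with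
  | nil => intro s; simp [pvSerL]
  | cons r t ih =>
      intro s
      rw [List.foldl_cons, ih]
      have := pvGetConf_row r s
      simp only [List.flatten_cons, pvSerL, List.map_append, List.flatten_append] at *
      rw [this]; simp

-- A's inner while loop: appends l.length consecutive integers starting at s
theorem pvInner (l : List Int) (s : Int) (acc : List Int) :
    l.foldl (fun (p : Int × List Int) _ => (p.1 + 1, p.2 ++ [p.1])) (s, acc)
      = (s + l.length, acc ++ PySem.List.pyRange s (s + l.length) 1) := by
  induction l generalizing s acc with
  | nil => simp [PySem.List.pyRange_one_eq_nil]
  | cons a t ih =>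
      rw [List.foldl_cons, ih]
      simp only [List.length_cons, Prod.mk.injEq]
      push_cast
      have hcons : PySem.List.pyRange s (s + ((t.length : Int) + 1)) 1
          = s :: PySem.List.pyRange (s + 1) (s + 1 + (t.length : Int)) 1 := by
        rw [PySem.List.pyRange_one_cons (by linarith [Int.natCast_nonneg t.length])]
        congr 1
        ring
      rw [hcons]
      refine ⟨by ring, by simp⟩

-- the grid A builds: k rows, each a run of n consecutive ints, starting at s
def pvGrid (n : Int) (s : Int) (k : Nat) : List (List Int) :=
  match k with
  | 0 => []
  | k + 1 => PySem.List.pyRange s (s + n) 1 :: pvGrid n (s + n) k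

theorem pvGrid_length (n : Int) (s : Int) (k : Nat) : (pvGrid n s k).length = k := by
  induction k generalizing s with
  | zero => rfl
  | succ m ih => simp [pvGrid, ih]

theorem pvGrid_snoc (n : Int) (s : Int) (k : Nat) :
    pvGrid n s (k + 1) = pvGrid n s k ++ [PySem.List.pyRange (s + k * n) (s + k * n + n) 1] := by
  induction k generalizing s with
  | zero => simp [pvGrid]
  | succ m ih =>
      rw [pvGrid, ih, pvGrid]
      simp only [List.cons_append]
      have h1 : s + n + (m : Int) * n = s + ((m : Int) + 1) * n := by ring
      push_cast
      rw [h1]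

theorem pvGrid_flatten (n : Int) (hn : 0 ≤ n) (s : Int) (k : Nat) :
    (pvGrid n s k).flatten = PySem.List.pyRange s (s + k * n) 1 := by
  induction k generalizing s with
  | zero => simp [pvGrid, PySem.List.pyRange_one_eq_nil]
  | succ m ih =>
      rw [pvGrid, List.flatten_cons, ih]
      push_cast
      have h : s + ((m : Int) + 1) * n = s + n + (m : Int) * n := by ring
      rw [h, ← PySem.List.pyRange_one_append s (s + n) (s + n + (m : Int) * n)
            (by linarith) (by nlinarith [Int.natCast_nonneg m])]

-- A's outer while loop
theorem pvOuter (n : Int) (hn : 0 ≤ n) (l : List Int) (s : Int) (acc : List (List Int)) :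
    l.foldl
      (fun (st : Int × List (List Int)) _ =>
        let inner := (PySem.List.pyRange 0 n 1).foldl
          (fun (p : Int × List Int) _ => (p.1 + 1, p.2 ++ [p.1])) (st.1, ([] : List Int))
        (inner.1, st.2 ++ [inner.2])) (s, acc)
      = (s + n * l.length, acc ++ pvGrid n s l.length) := by
  induction l generalizing s acc with
  | nil => simp [pvGrid]
  | cons b t ih =>
      rw [List.foldl_cons]
      dsimp only
      rw [pvInner, ih]
      have hlen : ((PySem.List.pyRange 0 n 1).length : Int) = n := by
        rw [PySem.List.length_pyRange_one]
        simp [Int.toNat_of_nonneg hn]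
      rw [hlen]
      simp only [Prod.mk.injEq, List.length_cons]
      refine ⟨by push_cast; ring, ?_⟩
      simp [pvGrid]

-- B's flat comprehension is one long run of consecutive integers
theorem pvFlat_aux (rows : Int) (hr : 0 ≤ rows) (m : Nat) :
    (PySem.List.pyRange 0 m 1).flatMap
        (fun r => PySem.List.pyRange (r * rows + 1) (r * rows + rows + 1) 1)
      = PySem.List.pyRange 1 (m * rows + 1) 1 := by
  induction m with
  | zero => simp [PySem.List.pyRange_one_eq_nil]
  | succ m ih =>
      push_cast
      rw [PySem.List.pyRange_one_succ_right (by positivity), List.flatMap_append, ih]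
      simp only [List.flatMap_cons, List.flatMap_nil, List.append_nil]
      rw [show ((m : Int) + 1) * rows + 1 = (m : Int) * rows + rows + 1 from by ring]
      rw [← PySem.List.pyRange_one_append 1 ((m : Int) * rows + 1) ((m : Int) * rows + rows + 1)
            (by nlinarith [mul_nonneg (Int.natCast_nonneg m) hr]) (by linarith)]

-- ===== VERDICT (by name: the statement is the Claim_ definition above) =====
theorem get_tar_conf_spec : Claim_equal_get_tar_conf := by
  intro rows _ hpre
  unfold Pre_get_tar_conf at hpre
  unfold Spec_get_tar_conf
  obtain ⟨k, rfl⟩ : ∃ k : Nat, rows = (k : Int) :=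
    ⟨rows.toNat, (Int.toNat_of_nonneg (by omega)).symm⟩
  have hk : 1 ≤ k := by exact_mod_cast hpre
  have hk0 : (0 : Int) ≤ (k : Int) := by positivity
  have hk1 : (1 : Int) ≤ (k : Int) := by exact_mod_cast hk
  have hidx : ((k : Int) - 1) = ((k - 1 : Nat) : Int) := by omega
  have hklen : ((PySem.List.pyRange 0 (k : Int) 1).length) = k := by
    rw [PySem.List.length_pyRange_one]; simp
  have hsplit := pvGrid_snoc (k : Int) 1 (k - 1)
  rw [Nat.sub_add_cancel hk] at hsplit
  have hfront : (pvGrid (k : Int) 1 (k - 1)).length = k - 1 := pvGrid_length _ _ _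
  have hprod : (0 : Int) ≤ ((k - 1 : Nat) : Int) * k :=
    mul_nonneg (Int.natCast_nonneg _) hk0
  have hrow : PySem.List.pyRange (1 + ((k - 1 : Nat) : Int) * k) (1 + ((k - 1 : Nat) : Int) * k + k) 1
      = PySem.List.pyRange (1 + ((k - 1 : Nat) : Int) * k) (1 + ((k - 1 : Nat) : Int) * k + k - 1) 1
        ++ [1 + ((k - 1 : Nat) : Int) * k + k - 1] := by
    conv_lhs => rw [show 1 + ((k - 1 : Nat) : Int) * k + k
        = (1 + ((k - 1 : Nat) : Int) * k + k - 1) + 1 from by ring]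
    exact PySem.List.pyRange_one_succ_right (by linarith)
  have hrowlen : (PySem.List.pyRange (1 + ((k - 1 : Nat) : Int) * k)
      (1 + ((k - 1 : Nat) : Int) * k + k - 1) 1).length = k - 1 := by
    rw [PySem.List.length_pyRange_one,
        show 1 + ((k - 1 : Nat) : Int) * k + k - 1 - (1 + ((k - 1 : Nat) : Int) * k)
          = ((k - 1 : Nat) : Int) from by rw [← hidx]; ring]
    simp
  have hend : 1 + ((k - 1 : Nat) : Int) * k + k - 1 = (k : Int) * k := by rw [← hidx]; ring
  -- reduce the A side to pvGetConf of an explicit grid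
  unfold get_tar_conf
  rw [pvOuter (k : Int) hk0]
  dsimp only
  rw [hklen, List.nil_append, hidx, hsplit,
      PySem.List.pyGetD_natCast, PySem.List.pySetD_natCast, PySem.List.pySetD_natCast]
  rw [pvLast_getD' _ _ _ _ hfront.symm]
  rw [hrow]
  rw [pvLast_set' _ _ _ _ hrowlen.symm]
  rw [pvLast_set' _ _ _ _ hfront.symm]
  -- reduce the B side to a join over an explicit flat list
  unfold get_tar_conf_alt
  dsimp only
  rw [pvFlat_aux (k : Int) hk0 k]
  rw [show PySem.List.pyRange 1 ((k : Int) * k + 1) 1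
      = PySem.List.pyRange 1 ((k : Int) * k) 1 ++ [(k : Int) * k] from
    PySem.List.pyRange_one_succ_right (by nlinarith)]
  rw [pvSet_neg]
  -- both sides serialize the same flat list
  apply String.toList_inj.mp
  rw [pvGetConf_toList, pvJoinStr]
  congr 1
  rw [List.flatten_append]
  simp only [List.flatten_cons, List.flatten_nil, List.append_nil]
  rw [pvGrid_flatten (k : Int) hk0 1 (k - 1), ← List.append_assoc]
  rw [← PySem.List.pyRange_one_append 1 (1 + ((k - 1 : Nat) : Int) * k)
        (1 + ((k - 1 : Nat) : Int) * k + k - 1) (by linarith) (by linarith)]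
  rw [hend]
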